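-- pv_equiv track=rewrite | github.com/hicsail/corpus | hax/swedish_xlsx.py | format_other
-- ===== SOURCE A (Python) =====
-- def format_other(row):
--
--     ret = []
--
--     tmp = row[10].split()
--     link = ''
--
--     for t in tmp:
--         if t.strip()[0:4] == 'http':
--             link = t.strip()
--
--     ret.append(link)
--     ret.append(row[0])
--     ret.append(row[1])
--     ret.append(' '.join([row[5], row[6]]))
--
--     return ret
-- ===== SOURCE B (Python) =====
-- def _last_link(s):
--     # Walk the cell backwards character by character; no tokenization of the
--     # whole string, early exit at the first (i.e. last-in-s) http token.
--     tok = ''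
--     for c in reversed(s):
--         if c.isspace():
--             if tok[:4] == 'http':
--                 return tok
--             tok = ''
--         else:
--             tok = c + tok
--     return tok if tok[:4] == 'http' else ''
--
--
-- def format_other(row):
--     return [_last_link(row[10]), row[0], row[1], ' '.join([row[5], row[6]])]
-- ===== Notes on version B (the rewrite author's own statement) =====
-- stated objective: alternative
-- what changed: B drops split() entirely: a helper walks row[10] backwards character by character, accumulating the current whitespace-delimited token and returning at the first boundary where it starts with 'http' (A tokenizes the whole cell and overwrites link on every match); the redundant strip() of A is a no-op on split() tokens and disappears.
import Mathlib
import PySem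

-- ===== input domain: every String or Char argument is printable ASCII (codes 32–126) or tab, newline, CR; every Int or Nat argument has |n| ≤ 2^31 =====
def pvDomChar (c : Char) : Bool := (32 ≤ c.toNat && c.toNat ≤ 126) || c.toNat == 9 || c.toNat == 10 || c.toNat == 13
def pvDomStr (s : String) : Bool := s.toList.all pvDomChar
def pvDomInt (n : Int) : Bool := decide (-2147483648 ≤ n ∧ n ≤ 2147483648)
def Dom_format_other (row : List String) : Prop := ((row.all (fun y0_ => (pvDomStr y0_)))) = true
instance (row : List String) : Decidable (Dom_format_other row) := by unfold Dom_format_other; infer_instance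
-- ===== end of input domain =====

-- B drops split() entirely: it scans row[10] backwards character by character and
-- returns the first whitespace-delimited http-token it completes; alternative, not faster.

-- ===== PORT A =====
def format_other (row : List String) : List String :=
  match PySem.List.pyGet? row 10, PySem.List.pyGet? row 0, PySem.List.pyGet? row 1,
        PySem.List.pyGet? row 5, PySem.List.pyGet? row 6 with
  | some r10, some r0, some r1, some r5, some r6 =>
    let tmp := PySem.Str.split₀ r10
    let link := tmp.foldl (fun link t =>
      if PySem.Str.slice (PySem.Str.strip t) (some 0) (some 4) == "http" then PySem.Str.strip t
      else link) ""
    [link, r0, r1, PySem.Str.join " " [r5, r6]]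
  | _, _, _, _, _ => []   -- unreachable under Pre_ (Python raises IndexError)

-- ===== PORT B =====
-- _last_link's loop over reversed(s): structural recursion on the reversed char list,
-- tok accumulated back-to-front (c :: tok), early return at a matching boundary.
def lastLinkGo (cs : List Char) (tok : List Char) : List Char :=
  match cs with
  | [] => if PySem.Chars.slice tok none (some 4) == ['h','t','t','p'] then tok else []
  | c :: rest =>
    if PySem.Chars.isspace c then
      if PySem.Chars.slice tok none (some 4) == ['h','t','t','p'] then tok
      else lastLinkGo rest []
    else lastLinkGo rest (c :: tok)

def format_other_alt (row : List String) : List String :=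
  -- Option.bind chain guards the same indexing that Python B performs directly
  (((PySem.List.pyGet? row 10).bind fun r10 =>
    (PySem.List.pyGet? row 0).bind fun r0 =>
    (PySem.List.pyGet? row 1).bind fun r1 =>
    (PySem.List.pyGet? row 5).bind fun r5 =>
    (PySem.List.pyGet? row 6).map fun r6 =>
      [String.ofList (lastLinkGo r10.toList.reverse []),
       r0, r1, PySem.Str.join " " [r5, r6]]).getD [])

-- ===== PRECONDITION & SPEC =====
-- Python A raises IndexError on rows with fewer than 11 cells (row[10]); excluded.
def Pre_format_other (row : List String) : Prop := 11 ≤ row.length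
instance (row : List String) : Decidable (Pre_format_other row) := by unfold Pre_format_other; infer_instance
def pvWitness_format_other : List String :=
  ["a", "b", "", "", "", "c", "d", "", "", "", "x http://u.v y"]
def Spec_format_other (row : List String) (out : List String) : Prop := out = format_other_alt row
instance (row : List String) (out : List String) : Decidable (Spec_format_other row out) := by unfold Spec_format_other; infer_instance

-- ===== CLAIM (what is proved, stated in full; the proofs are below) =====
def Claim_equal_format_other : Prop := ∀ (row : List String), Dom_format_other row → Pre_format_other row → Spec_format_other row (format_other row)

-- ===== LEMMAS AND PROOFS =====

-- the token predicate both programs test, on the char-list side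
def pvHttp (t : List Char) : Bool := PySem.List.slice t none (some 4) == ['h','t','t','p']

-- split() tokens contain no whitespace characters
theorem split0_go_no_space (s cur : List Char) (acc : List (List Char))
    (hcur : ∀ c ∈ cur, PySem.Chars.isspace c = false)
    (hacc : ∀ t ∈ acc, ∀ c ∈ t, PySem.Chars.isspace c = false) :
    ∀ t ∈ PySem.Chars.split₀.go s cur acc, ∀ c ∈ t, PySem.Chars.isspace c = false := by
  induction s generalizing cur acc with
  | nil =>
    intro t ht
    simp only [PySem.Chars.split₀.go] at ht
    split at ht
    · simp only [List.mem_reverse] at ht; exact hacc t ht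
    · simp only [List.mem_reverse, List.mem_cons] at ht
      rcases ht with h | h
      · subst h; intro c hc; exact hcur c (List.mem_reverse.mp hc)
      · exact hacc t h
  | cons c rest ih =>
    intro t ht
    simp only [PySem.Chars.split₀.go] at ht
    by_cases hsp : PySem.Chars.isspace c = true
    · rw [if_pos hsp] at ht
      by_cases hemp : cur.isEmpty = true
      · rw [if_pos hemp] at ht
        exact ih [] acc (by simp) hacc t ht
      · rw [if_neg hemp] at ht
        refine ih [] (cur.reverse :: acc) (by simp) ?_ t ht
        intro u hu
        rcases List.mem_cons.mp hu with h | h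
        · subst h; intro d hd; exact hcur d (List.mem_reverse.mp hd)
        · exact hacc u h
    · rw [if_neg hsp] at ht
      refine ih (c :: cur) acc ?_ hacc t ht
      intro d hd
      rcases List.mem_cons.mp hd with h | h
      · subst h; exact Bool.eq_false_iff.mpr hsp
      · exact hcur d h

theorem split0_token_no_space (s : List Char) :
    ∀ t ∈ PySem.Chars.split₀ s, ∀ c ∈ t, PySem.Chars.isspace c = false := by
  intro t ht
  exact split0_go_no_space s [] [] (by simp) (by simp) t ht

theorem dropWhile_eq_self_of_all_false {α : Type} (p : α → Bool) (l : List α)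
    (h : ∀ c ∈ l, p c = false) : l.dropWhile p = l := by
  cases l with
  | nil => rfl
  | cons c l => simp [List.dropWhile, h c (List.mem_cons_self ..)]

theorem strip_eq_self_of_no_space (t : List Char)
    (h : ∀ c ∈ t, PySem.Chars.isspace c = false) : PySem.Chars.strip t = t := by
  unfold PySem.Chars.strip PySem.Chars.rstrip PySem.Chars.lstrip
  rw [dropWhile_eq_self_of_all_false _ _ h,
      dropWhile_eq_self_of_all_false _ _ (fun c hc => h c (List.mem_reverse.mp hc)),
      List.reverse_reverse]

theorem str_strip_eq_self (t : String)
    (h : ∀ c ∈ t.toList, PySem.Chars.isspace c = false) : PySem.Str.strip t = t := by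
  unfold PySem.Str.strip
  rw [strip_eq_self_of_no_space _ h]
  simp

theorem str_split0_strip (s : String) :
    ∀ t ∈ PySem.Str.split₀ s, PySem.Str.strip t = t := by
  intro t ht
  unfold PySem.Str.split₀ at ht
  rcases List.mem_map.mp ht with ⟨u, hu, rfl⟩
  apply str_strip_eq_self
  intro c hc
  simp only [String.toList_ofList] at hc
  exact split0_token_no_space s.toList u hu c hc

-- overwrite-on-every-match fold = first match of the reversed list
theorem foldl_overwrite_eq_find {α : Type} (p : α → Bool) (l : List α) (a : α) :
    l.foldl (fun acc t => if p t then t else acc) a = (l.reverse.find? p).getD a := by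
  induction l generalizing a with
  | nil => rfl
  | cons t l ih =>
    simp only [List.foldl_cons, List.reverse_cons, List.find?_append]
    rw [ih]
    cases h : l.reverse.find? p with
    | some u => simp
    | none => cases hpt : p t <;> simp [List.find?, hpt]

-- split₀.go's accumulator is an output prefix (reversed)
theorem split0_go_acc (s : List Char) : ∀ (cur : List Char) (acc : List (List Char)),
    PySem.Chars.split₀.go s cur acc = acc.reverse ++ PySem.Chars.split₀.go s cur [] := by
  induction s with
  | nil =>
    intro cur acc
    simp only [PySem.Chars.split₀.go]
    by_cases h : cur.isEmpty = true <;> simp [h]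
  | cons c rest ih =>
    intro cur acc
    simp only [PySem.Chars.split₀.go]
    by_cases hsp : PySem.Chars.isspace c = true
    · by_cases h : cur.isEmpty = true
      · simp only [hsp, h, if_true]
        exact ih [] acc
      · simp only [hsp, h, if_true, Bool.false_eq_true, if_false]
        rw [ih [] (cur.reverse :: acc), ih [] [cur.reverse]]
        simp
    · simp only [hsp, Bool.false_eq_true, if_false]
      exact ih (c :: cur) acc

-- splitting the string at a space splits the token list
theorem split0_go_space_append (c : Char) (hc : PySem.Chars.isspace c = true)
    (rest : List Char) :
    ∀ (l cur : List Char) (acc : List (List Char)),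
      PySem.Chars.split₀.go (l ++ c :: rest) cur acc =
        PySem.Chars.split₀.go rest [] ((PySem.Chars.split₀.go l cur acc).reverse) := by
  intro l
  induction l with
  | nil =>
    intro cur acc
    simp only [List.nil_append, PySem.Chars.split₀.go]
    by_cases h : cur.isEmpty = true <;> simp [hc, h]
  | cons d l ih =>
    intro cur acc
    simp only [List.cons_append, PySem.Chars.split₀.go]
    by_cases hsp : PySem.Chars.isspace d = true
    · by_cases h : cur.isEmpty = true <;> simp [hsp, h, ih]
    · simp [hsp, ih]

theorem split0_space_append (c : Char) (hc : PySem.Chars.isspace c = true)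
    (l rest : List Char) :
    PySem.Chars.split₀ (l ++ c :: rest) =
      PySem.Chars.split₀ l ++ PySem.Chars.split₀ rest := by
  unfold PySem.Chars.split₀
  rw [split0_go_space_append c hc rest l [] [],
      split0_go_acc rest [] ((PySem.Chars.split₀.go l [] []).reverse)]
  simp

-- split₀ of a whitespace-free string is the string itself (or nothing if empty)
theorem split0_no_space (tok : List Char)
    (h : ∀ c ∈ tok, PySem.Chars.isspace c = false) :
    PySem.Chars.split₀ tok = if tok = [] then [] else [tok] := by
  have go : ∀ (t cur : List Char), (∀ c ∈ t, PySem.Chars.isspace c = false) →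
      PySem.Chars.split₀.go t cur [] =
        (if (t.reverse ++ cur).isEmpty = true then [] else [(t.reverse ++ cur).reverse]) := by
    intro t
    induction t with
    | nil => intro cur _; simp [PySem.Chars.split₀.go]
    | cons c t ih =>
      intro cur hns
      simp only [PySem.Chars.split₀.go, hns c (List.mem_cons_self ..)]
      rw [if_neg (by simp), ih (c :: cur) (fun d hd => hns d (List.mem_cons_of_mem _ hd))]
      simp
  unfold PySem.Chars.split₀
  rw [go tok [] h]
  cases tok with
  | nil => simp
  | cons c t => simp

-- pvHttp rejects the empty token
theorem pvHttp_nil : pvHttp [] = false := by decide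

-- MAIN INVARIANT: the reverse char scan computes the last http token of l ++ tok
theorem lastLinkGo_spec (l : List Char) :
    ∀ (tok : List Char), (∀ c ∈ tok, PySem.Chars.isspace c = false) →
      lastLinkGo l.reverse tok =
        (((PySem.Chars.split₀ (l ++ tok)).reverse.find? pvHttp).getD []) := by
  induction l using List.reverseRecOn with
  | nil =>
    intro tok htok
    simp only [List.reverse_nil, lastLinkGo, List.nil_append]
    rw [split0_no_space tok htok]
    cases h : pvHttp tok with
    | true =>
      have htok' : tok ≠ [] := by
        intro he; rw [he, pvHttp_nil] at h; exact Bool.false_ne_true h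
      simp only [pvHttp, PySem.Chars.slice_eq_listSlice] at h ⊢
      simp [htok', pvHttp, h]
    | false =>
      simp only [pvHttp, PySem.Chars.slice_eq_listSlice] at h ⊢
      by_cases he : tok = []
      · simp [he]
      · simp [he, List.find?, pvHttp, h]
  | append_singleton l c ih =>
    intro tok htok
    rw [List.reverse_append, List.reverse_singleton, List.singleton_append]
    by_cases hsp : PySem.Chars.isspace c = true
    · simp only [lastLinkGo, hsp, if_true]
      rw [List.append_assoc, List.singleton_append,
          split0_space_append c hsp l tok, split0_no_space tok htok]
      cases h : pvHttp tok with
      | true =>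
        have htok' : tok ≠ [] := by
          intro he; rw [he, pvHttp_nil] at h; exact Bool.false_ne_true h
        simp only [pvHttp, PySem.Chars.slice_eq_listSlice] at h ⊢
        simp [htok', pvHttp, h]
      | false =>
        have hrest : lastLinkGo l.reverse [] =
            (((PySem.Chars.split₀ (l ++ [])).reverse.find? pvHttp).getD []) :=
          ih [] (by simp)
        rw [List.append_nil] at hrest
        simp only [pvHttp, PySem.Chars.slice_eq_listSlice] at h ⊢
        rw [if_neg (by simp [h]), hrest]
        by_cases he : tok = []
        · simp [he]
        · simp [he, pvHttp, h]
    · simp only [lastLinkGo, hsp, Bool.false_eq_true, if_false]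
      have : l ++ [c] ++ tok = l ++ (c :: tok) := by simp
      rw [this]
      exact ih (c :: tok) (by
        intro d hd
        rcases List.mem_cons.mp hd with h | h
        · subst h; exact Bool.eq_false_iff.mpr hsp
        · exact htok d h)

-- lift find? through the String/List Char bridge
theorem find_map_mk (l : List (List Char)) :
    ((l.map (fun cs => String.ofList cs)).find?
        (fun t => PySem.Str.slice t none (some 4) == "http")).getD "" =
      String.ofList ((l.find? pvHttp).getD []) := by
  rw [List.find?_map]
  have hp : (fun t => PySem.Str.slice t none (some 4) == "http") ∘ (fun cs => String.ofList cs)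
      = pvHttp := by
    funext cs
    simp only [Function.comp, pvHttp]
    rcases h : PySem.List.slice cs none (some 4) == ['h','t','t','p'] with _ | _
    · simp only [beq_eq_false_iff_ne, ne_eq] at h
      apply beq_eq_false_iff_ne.mpr
      intro he
      apply h
      have := congrArg String.toList he
      simpa [PySem.Str.slice, String.toList_ofList] using this
    · have := beq_iff_eq.mp h
      apply beq_iff_eq.mpr
      apply String.toList_injective ?_
      simpa [PySem.Str.slice, String.toList_ofList] using this
  rw [hp]
  cases h : l.find? pvHttp with
  | none => rfl
  | some t => simp

-- ===== VERDICT (by name: the statement is the Claim_ definition above) =====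
theorem format_other_spec : Claim_equal_format_other := by
  intro row _ _
  unfold Spec_format_other format_other format_other_alt
  cases h10 : PySem.List.pyGet? row 10 with
  | none => rfl
  | some r10 =>
  cases h0 : PySem.List.pyGet? row 0 with
  | none => rfl
  | some r0 =>
  cases h1 : PySem.List.pyGet? row 1 with
  | none => rfl
  | some r1 =>
  cases h5 : PySem.List.pyGet? row 5 with
  | none => rfl
  | some r5 =>
  cases h6 : PySem.List.pyGet? row 6 with
  | none => rfl
  | some r6 =>
  simp only
  congr 1
  -- A's fold over tokens, with strip removed and slice normalised
  have hstrip := str_split0_strip r10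
  have hcongr : (PySem.Str.split₀ r10).foldl (fun link t =>
      if PySem.Str.slice (PySem.Str.strip t) (some 0) (some 4) == "http" then PySem.Str.strip t
      else link) ""
      = (PySem.Str.split₀ r10).foldl (fun link t =>
      if PySem.Str.slice t none (some 4) == "http" then t else link) "" := by
    apply PySem.List.foldl_congr_mem
    intro acc t ht
    rw [hstrip t ht]
    have : PySem.Str.slice t (some 0) (some 4) = PySem.Str.slice t none (some 4) := by
      unfold PySem.Str.slice PySem.Chars.slice
      rw [PySem.List.slice_zero_start]
    rw [this]
  rw [hcongr, foldl_overwrite_eq_find]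
  -- bridge A's String tokens to the char-list side and apply the main invariant
  have hsplit : PySem.Str.split₀ r10
      = (PySem.Chars.split₀ r10.toList).map (fun cs => String.ofList cs) := rfl
  rw [hsplit, ← List.map_reverse, find_map_mk]
  rw [lastLinkGo_spec r10.toList [] (by simp), List.append_nil]
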